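-- pv_equiv track=rewrite | github.com/pellsson/aoc2021 | hacks/day3.py | count_pos
-- ===== SOURCE A (Python) =====
-- def count_pos(arr, mask):
-- 	v = 0
-- 	for it in arr:
-- 		if it & mask:
-- 			v += 1
-- 		else:
-- 			v -= 1
-- 	return v
-- ===== SOURCE B (Python) =====
-- def count_pos(arr, mask):
--     # Divide-and-conquer recursion on index ranges: the balance of a range is
--     # the sum of the balances of its two halves.
--     def go(lo, hi):
--         if hi <= lo:
--             return 0
--         if hi == lo + 1:
--             return 1 if arr[lo] & mask else -1
--         mid = (lo + hi) // 2
--         return go(lo, mid) + go(mid, hi)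
--     return go(0, len(arr))
-- ===== Notes on version B (the rewrite author's own statement) =====
-- stated objective: alternative
-- what changed: B replaces A's single left-to-right +1/-1 accumulator loop by a divide-and-conquer recursion on index ranges that computes each half's balance independently and adds them, relying on associativity of the balance sum.
import Mathlib
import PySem

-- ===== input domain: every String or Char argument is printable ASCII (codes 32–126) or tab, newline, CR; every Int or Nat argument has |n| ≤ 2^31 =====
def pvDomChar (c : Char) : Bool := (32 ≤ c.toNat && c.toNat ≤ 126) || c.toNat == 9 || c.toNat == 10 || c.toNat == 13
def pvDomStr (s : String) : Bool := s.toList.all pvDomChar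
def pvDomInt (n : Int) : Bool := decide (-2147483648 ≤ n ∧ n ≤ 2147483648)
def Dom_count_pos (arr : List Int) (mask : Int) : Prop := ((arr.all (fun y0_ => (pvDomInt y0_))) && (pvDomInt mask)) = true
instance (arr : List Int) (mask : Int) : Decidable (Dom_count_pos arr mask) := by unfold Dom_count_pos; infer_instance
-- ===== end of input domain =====

-- B replaces A's left-to-right +1/-1 accumulator loop by a divide-and-conquer
-- recursion on index ranges (balance of a range = sum of the halves' balances);
-- objective: alternative decomposition, same O(n) cost.

-- ===== PORT A =====
def count_pos (arr : List Int) (mask : Int) : Int :=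
  arr.foldl (fun v it => if PySem.Int.band it mask ≠ 0 then v + 1 else v - 1) 0

-- ===== PORT B =====
-- recursive helper go(lo, hi) of Source B; arr[lo] with 0 ≤ lo < arr.length is arr.getD lo 0;
-- fuel (≥ hi - lo at every call) only makes the halving recursion structural
def cpGo (arr : List Int) (mask : Int) : Nat → Nat → Nat → Int
  | 0, _, _ => 0
  | fuel + 1, lo, hi =>
    if hi ≤ lo then 0
    else if hi = lo + 1 then (if PySem.Int.band (arr.getD lo 0) mask ≠ 0 then 1 else -1)
    else
      let mid := (lo + hi) / 2
      cpGo arr mask fuel lo mid + cpGo arr mask fuel mid hi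

def count_pos_alt (arr : List Int) (mask : Int) : Int :=
  cpGo arr mask arr.length 0 arr.length

-- ===== PRECONDITION & SPEC =====
def Spec_count_pos (arr : List Int) (mask : Int) (out : Int) : Prop := out = count_pos_alt arr mask
instance (arr : List Int) (mask : Int) (out : Int) : Decidable (Spec_count_pos arr mask out) := by unfold Spec_count_pos; infer_instance

-- ===== CLAIM (what is proved, stated in full; the proofs are below) =====
def Claim_equal_count_pos : Prop := ∀ (arr : List Int) (mask : Int), Dom_count_pos arr mask → Spec_count_pos arr mask (count_pos arr mask)

-- ===== LEMMAS AND PROOFS =====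

-- the per-index contribution
def cpG (arr : List Int) (mask : Int) (i : Nat) : Int :=
  if PySem.Int.band (arr.getD i 0) mask ≠ 0 then 1 else -1

theorem cpGo_eq_sum (arr : List Int) (mask : Int) :
    ∀ n lo hi, hi - lo ≤ n →
      cpGo arr mask n lo hi = ∑ i ∈ Finset.Ico lo hi, cpG arr mask i := by
  intro n
  induction n with
  | zero =>
    intro lo hi h
    have hle : hi ≤ lo := by omega
    simp [cpGo, hle]
  | succ n ih =>
    intro lo hi h
    rw [cpGo]
    by_cases h1 : hi ≤ lo
    · simp [h1]
    · by_cases h2 : hi = lo + 1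
      · subst h2
        simp [h1, cpG]
      · simp only [h1, h2, if_false]
        have hm1 : (lo + hi) / 2 - lo ≤ n := by omega
        have hm2 : hi - (lo + hi) / 2 ≤ n := by omega
        rw [ih lo ((lo + hi) / 2) hm1, ih ((lo + hi) / 2) hi hm2]
        rw [Finset.sum_Ico_consecutive _ (by omega) (by omega)]

-- A's foldl is the plain sum of per-element contributions
theorem count_pos_foldl (arr : List Int) (mask v : Int) :
    arr.foldl (fun v it => if PySem.Int.band it mask ≠ 0 then v + 1 else v - 1) v
      = v + (arr.map (fun x => if PySem.Int.band x mask ≠ 0 then (1 : Int) else -1)).sum := by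
  induction arr generalizing v with
  | nil => simp
  | cons x xs ih =>
    rw [List.foldl_cons, ih]
    by_cases h : PySem.Int.band x mask = 0 <;> simp [h] <;> ring

-- the indexed sum over [0, length) equals the mapped list sum
theorem sum_range_cpG (mask : Int) :
    ∀ arr : List Int,
      (∑ i ∈ Finset.range arr.length, cpG arr mask i)
        = (arr.map (fun x => if PySem.Int.band x mask ≠ 0 then (1 : Int) else -1)).sum := by
  intro arr
  induction arr with
  | nil => simp
  | cons x xs ih =>
    have hlen : (x :: xs).length = xs.length + 1 := rfl
    rw [hlen, Finset.sum_range_succ']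
    have hshift : ∀ i, cpG (x :: xs) mask (i + 1) = cpG xs mask i := by
      intro i; simp [cpG]
    simp only [hshift, ih]
    simp [cpG]
    ring

-- ===== VERDICT (by name: the statement is the Claim_ definition above) =====
theorem count_pos_spec : Claim_equal_count_pos := by
  intro arr mask _
  unfold Spec_count_pos count_pos count_pos_alt
  rw [count_pos_foldl, cpGo_eq_sum arr mask arr.length 0 arr.length (by omega)]
  rw [← Finset.range_eq_Ico]
  rw [sum_range_cpG]
  ring
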